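-- pv_equiv track=rewrite | github.com/YoonSeok-Woo/python_study | BOJ_2115.py | sum_squar
-- ===== SOURCE A (Python) =====
-- def sum_squar(a,C):
--     res = 0
--     temp = 0
--     for i in a:
--         temp+=i
--         if temp>C:
--             break
--         res+=i**2
--
--     return res
-- ===== SOURCE B (Python) =====
-- def sum_squar(a, C):
--     prefix = []
--     s = 0
--     for x in a:
--         s += x
--         prefix.append(s)
--     cut = len(a)
--     for i, p in enumerate(prefix):
--         if p > C:
--             cut = i
--             break
--     return sum(x * x for x in a[:cut])
-- ===== Notes on version B (the rewrite author's own statement) =====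
-- stated objective: alternative
-- what changed: Replaces A's single interleaved loop with break by three separate passes: build the prefix-sum table, scan it for the first index exceeding C (default len(a)), then sum the squares of the elements before that cut.
import Mathlib
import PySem

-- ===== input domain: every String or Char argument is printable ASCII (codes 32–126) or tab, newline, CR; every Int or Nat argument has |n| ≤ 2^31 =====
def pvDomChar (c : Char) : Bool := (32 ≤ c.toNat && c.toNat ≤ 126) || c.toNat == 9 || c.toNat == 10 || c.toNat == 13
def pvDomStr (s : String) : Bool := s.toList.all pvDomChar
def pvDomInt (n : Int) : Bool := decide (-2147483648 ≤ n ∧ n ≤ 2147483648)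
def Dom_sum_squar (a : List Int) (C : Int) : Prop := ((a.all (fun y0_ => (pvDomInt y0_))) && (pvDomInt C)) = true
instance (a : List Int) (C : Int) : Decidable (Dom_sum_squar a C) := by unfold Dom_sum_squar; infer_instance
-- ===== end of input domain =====

-- B rebuilds A's interleaved break-loop as three passes (prefix-sum table, cut search, square-sum); alternative decomposition, same cost.


-- ===== PORT A =====
-- A's for-loop with break: temp accumulates the prefix sum, res the squares, stop when temp > C
def sumSquarGoA (C : Int) : List Int → Int → Int → Int
  | [], _, res => res
  | i :: t, temp, res =>
    if temp + i > C then res else sumSquarGoA C t (temp + i) (res + i ^ 2)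

def sum_squar (a : List Int) (C : Int) : Int := sumSquarGoA C a 0 0

-- ===== PORT B =====
-- pass 1: prefix-sum table (Python's first loop appending s)
def sumSquarPrefix : List Int → Int → List Int
  | [], _ => []
  | x :: t, s => (s + x) :: sumSquarPrefix t (s + x)

-- pass 2: enumerate scan for the first index whose prefix sum exceeds C, default dflt
def sumSquarFindCut (C : Int) : List Int → Nat → Nat → Nat
  | [], _, dflt => dflt
  | p :: t, i, dflt => if p > C then i else sumSquarFindCut C t (i + 1) dflt

def sum_squar_alt (a : List Int) (C : Int) : Int :=
  let pref := sumSquarPrefix a 0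
  let cut := sumSquarFindCut C pref 0 a.length
  (a.take cut).foldl (fun acc x => acc + x * x) 0

-- ===== PRECONDITION & SPEC =====
def Spec_sum_squar (a : List Int) (C : Int) (out : Int) : Prop := out = sum_squar_alt a C
instance (a : List Int) (C : Int) (out : Int) : Decidable (Spec_sum_squar a C out) := by unfold Spec_sum_squar; infer_instance

-- ===== CLAIM (what is proved, stated in full; the proofs are below) =====
def Claim_equal_sum_squar : Prop := ∀ (a : List Int) (C : Int), Dom_sum_squar a C → Spec_sum_squar a C (sum_squar a C)

-- ===== LEMMAS AND PROOFS =====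

theorem sumSquarFindCut_shift (C : Int) (ps : List Int) :
    ∀ i d, sumSquarFindCut C ps (i + 1) (d + 1) = sumSquarFindCut C ps i d + 1 := by
  induction ps with
  | nil => intro i d; simp [sumSquarFindCut]
  | cons p t ih =>
    intro i d
    simp only [sumSquarFindCut]
    split <;> simp [ih]

theorem sq_foldl_add (l : List Int) :
    ∀ r, l.foldl (fun acc x => acc + x * x) r = r + l.foldl (fun acc x => acc + x * x) 0 := by
  induction l with
  | nil => intro r; simp
  | cons x t ih =>
    intro r
    simp only [List.foldl_cons]
    rw [ih (r + x * x), ih (0 + x * x)]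
    ring

theorem sum_squar_main (C : Int) (a : List Int) :
    ∀ s r, sumSquarGoA C a s r =
      r + (a.take (sumSquarFindCut C (sumSquarPrefix a s) 0 a.length)).foldl
            (fun acc x => acc + x * x) 0 := by
  induction a with
  | nil => intro s r; simp [sumSquarGoA, sumSquarPrefix, sumSquarFindCut]
  | cons i t ih =>
    intro s r
    simp only [sumSquarGoA, sumSquarPrefix, sumSquarFindCut, List.length_cons]
    by_cases h : s + i > C
    · simp [h]
    · simp only [h, if_false]
      rw [show (0 : Nat) + 1 = 0 + 1 from rfl, sumSquarFindCut_shift,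
          List.take_succ_cons, List.foldl_cons, ih (s + i) (r + i ^ 2),
          sq_foldl_add _ (0 + i * i)]
      ring

-- ===== VERDICT (by name: the statement is the Claim_ definition above) =====
theorem sum_squar_spec : Claim_equal_sum_squar := by
  intro a C _
  show sum_squar a C = sum_squar_alt a C
  rw [sum_squar, sum_squar_alt, sum_squar_main]
  simp
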